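-- pv_equiv track=rewrite | github.com/SaebomSHIN/codingTest | 프로그래머스/0/120812. 최빈값 구하기/최빈값 구하기.py | solution
-- ===== SOURCE A (Python) =====
-- def solution(array):
--     # 빈도수를 저장할 딕셔너리 생성
--     freq = {}
--
--     # 배열의 각 원소의 빈도수를 계산
--     for num in array:
--         if num in freq:
--             freq[num] += 1
--         else:
--             freq[num] = 1
--
--     # 최빈값의 빈도수와 그에 해당하는 값들을 찾음
--     max_freq = max(freq.values())
--     modes = [num for num, count in freq.items() if count == max_freq]
--
--     # 최빈값이 여러 개면 -1을 반환, 아니면 최빈값 반환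
--     if len(modes) > 1:
--         return -1
--     else:
--         return modes[0]
-- ===== SOURCE B (Python) =====
-- def solution(array):
--     # sort, then one scan over runs of equal values; -1 if the longest run is not unique
--     if not array:
--         raise ValueError("empty array has no mode")
--     arr = sorted(array)
--     best_val = cur_val = arr[0]
--     best_len = cur_len = 1
--     ties = 1
--     for x in arr[1:]:
--         if x == cur_val:
--             cur_len += 1
--         else:
--             cur_val, cur_len = x, 1
--         if cur_len > best_len:
--             best_val, best_len, ties = x, cur_len, 1
--         elif cur_len == best_len:
--             ties += 1
--     return best_val if ties == 1 else -1
-- ===== Notes on version B (the rewrite author's own statement) =====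
-- stated objective: alternative
-- what changed: Replaces A's frequency dictionary plus max/filter passes by sorting the array and a single run-length scan that tracks the best run, its value and a tie counter.
import Mathlib
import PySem

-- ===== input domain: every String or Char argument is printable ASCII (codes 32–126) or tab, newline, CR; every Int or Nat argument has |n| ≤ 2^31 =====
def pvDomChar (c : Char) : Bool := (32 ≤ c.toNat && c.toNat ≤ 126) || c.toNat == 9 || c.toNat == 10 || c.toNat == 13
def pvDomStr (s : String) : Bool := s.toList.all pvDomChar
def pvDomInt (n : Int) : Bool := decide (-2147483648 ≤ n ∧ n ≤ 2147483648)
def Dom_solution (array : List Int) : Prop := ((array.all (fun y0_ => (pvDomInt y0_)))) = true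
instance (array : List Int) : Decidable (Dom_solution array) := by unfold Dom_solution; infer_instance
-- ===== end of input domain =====

-- B replaces A's frequency dictionary by a sort followed by a single run-length scan; objective: alternative decomposition.
-- On the empty list both programs raise (A: ValueError from max(), B: an explicit ValueError); Pre_ excludes it.

-- ===== PORT A =====
def solution (array : List Int) : Int :=
  let freq := array.foldl
    (fun d num =>
      if d.contains num then d.insert num (d.getD num 0 + 1)
      else d.insert num (1 : Int))
    PySem.Dict.empty
  match PySem.List.max? (PySem.Dict.values freq) (fun x => x) with
  | none => 0   -- Python: max(()) raises ValueError here (empty array); excluded by Pre_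
  | some maxFreq =>
    let modes := ((PySem.Dict.items freq).filter (fun p => p.2 == maxFreq)).map (fun p => p.1)
    if modes.length > 1 then -1
    else
      match PySem.List.pyGet? modes 0 with
      | some m => m
      | none => 0   -- unreachable: modes is nonempty whenever max() returned

-- ===== PORT B =====
-- one scan step: extend/replace the current run, then update (best value, best length, tie count)
def pvStep (s : Int × Int × Int × Int × Int) (x : Int) : Int × Int × Int × Int × Int :=
  match s with
  | (bv, bl, t, cv, cl) =>
    let rn := if x == cv then (cv, cl + 1) else (x, (1 : Int))
    if rn.2 > bl then (x, rn.2, 1, rn.1, rn.2)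
    else if rn.2 == bl then (bv, bl, t + 1, rn.1, rn.2)
    else (bv, bl, t, rn.1, rn.2)

def solution_alt (array : List Int) : Int :=
  match PySem.List.sorted array (fun x => x) false with
  | [] => 0   -- Python: raise ValueError (empty array); excluded by Pre_
  | a :: rest =>
    let st := rest.foldl pvStep (a, 1, 1, a, 1)
    if st.2.2.1 = 1 then st.1 else -1

-- ===== PRECONDITION & SPEC =====
-- Pre_ excludes exactly the empty list, on which both Pythons raise ValueError.
def Pre_solution (array : List Int) : Prop := array ≠ []
instance (array : List Int) : Decidable (Pre_solution array) := by unfold Pre_solution; infer_instance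
def pvWitness_solution : List Int := ([1, 2, 2] : List Int)

def Spec_solution (array : List Int) (out : Int) : Prop := out = solution_alt array
instance (array : List Int) (out : Int) : Decidable (Spec_solution array out) := by unfold Spec_solution; infer_instance

-- ===== CLAIM (what is proved, stated in full; the proofs are below) =====
def Claim_equal_solution : Prop := ∀ (array : List Int), Dom_solution array → Pre_solution array → Spec_solution array (solution array)


-- ===== LEMMAS AND PROOFS =====

-- invariant of B's scan after having consumed the (sorted) prefix p: with state (bv, bl, t, cv, cl),
-- cv is the largest value of p and cl its count, bl is the largest count in p, attained by bv,
-- and t is the number of distinct values of p whose count is bl.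
def pvInv (p : List Int) (s : Int × Int × Int × Int × Int) : Prop :=
  match s with
  | (bv, bl, t, cv, cl) =>
    cv ∈ p ∧ (∀ v ∈ p, v ≤ cv) ∧ cl = (p.count cv : Int) ∧
    bv ∈ p ∧ (p.count bv : Int) = bl ∧ (∀ v ∈ p, (p.count v : Int) ≤ bl) ∧
    t = ((p.toFinset.filter (fun v => (p.count v : Int) = bl)).card : Int)

lemma pvInv_step (p : List Int) (x : Int) (s : Int × Int × Int × Int × Int)
    (hInv : pvInv p s) (hle : ∀ v ∈ p, v ≤ x) : pvInv (p ++ [x]) (pvStep s x) := by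
  obtain ⟨bv, bl, t, cv, cl⟩ := s
  obtain ⟨h1, h2, h3, h4, h5, h6, h7⟩ := hInv
  have hcnt : ∀ v : Int, (p ++ [x]).count v = p.count v + (if x = v then 1 else 0) := by
    intro v
    simp [List.count_append, List.count_singleton']
  have hfin : (p ++ [x]).toFinset = insert x p.toFinset := by
    simp [List.toFinset_append]
  have hcl1 : (1 : Int) ≤ cl := by
    have := List.count_pos_iff.mpr h1
    omega
  have hbl1 : (1 : Int) ≤ bl := by
    have := List.count_pos_iff.mpr h4
    omega
  by_cases hx : x = cv
  · -- x extends the current run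
    have hxp : x ∈ p := hx ▸ h1
    have hfin' : (p ++ [x]).toFinset = p.toFinset := by
      rw [hfin, Finset.insert_eq_self.mpr (List.mem_toFinset.mpr hxp)]
    have hccv : ((p ++ [x]).count cv : Int) = cl + 1 := by
      rw [hcnt cv, if_pos hx]; push_cast; omega
    have hcother : ∀ v : Int, v ≠ cv → ((p ++ [x]).count v : Int) = (p.count v : Int) := by
      intro v hv
      rw [hcnt v, if_neg (by omega)]; push_cast; omega
    simp only [pvStep, beq_iff_eq, if_pos hx]
    by_cases hgt : cl + 1 > bl
    · -- the run becomes the strict best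
      rw [if_pos hgt]
      refine ⟨by simp [h1], ?_, ?_, by simp [hxp], ?_, ?_, ?_⟩
      · intro v hv
        rcases List.mem_append.mp hv with hv | hv
        · exact h2 v hv
        · simp at hv; omega
      · omega
      · rw [hx] at hccv ⊢; omega
      · intro v hv
        by_cases hvc : v = cv
        · rw [hvc]; omega
        · rw [hcother v hvc]
          have hvp : v ∈ p := by
            rcases List.mem_append.mp hv with hv | hv
            · exact hv
            · simp at hv; exact absurd (hv ▸ hx) hvc
          have := h6 v hvp
          omega
      · have : ((p ++ [x]).toFinset.filter (fun v => ((p ++ [x]).count v : Int) = cl + 1)) = {cv} := by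
          apply Finset.ext
          intro v
          simp only [Finset.mem_filter, Finset.mem_singleton, hfin']
          constructor
          · rintro ⟨hvm, hvc⟩
            by_contra hne
            rw [hcother v hne] at hvc
            have := h6 v (List.mem_toFinset.mp hvm)
            omega
          · rintro rfl
            exact ⟨List.mem_toFinset.mpr h1, hccv⟩
        rw [this]
        simp
    · rw [if_neg hgt]
      have hbvne : bv ≠ cv := by
        intro h
        rw [h] at h5
        omega
      have hcbv : ((p ++ [x]).count bv : Int) = bl := by rw [hcother bv hbvne]; omega
      by_cases heq : cl + 1 = bl
      · -- the run ties the best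
        rw [if_pos (by simpa using heq)]
        refine ⟨by simp [h1], ?_, ?_, by simp [h4], hcbv, ?_, ?_⟩
        · intro v hv
          rcases List.mem_append.mp hv with hv | hv
          · exact h2 v hv
          · simp at hv; omega
        · omega
        · intro v hv
          by_cases hvc : v = cv
          · rw [hvc]; omega
          · rw [hcother v hvc]
            have hvp : v ∈ p := by
              rcases List.mem_append.mp hv with hv | hv
              · exact hv
              · simp at hv; exact absurd (hv ▸ hx) hvc
            exact h6 v hvp
        · have hset : ((p ++ [x]).toFinset.filter (fun v => ((p ++ [x]).count v : Int) = bl)) =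
              insert cv (p.toFinset.filter (fun v => (p.count v : Int) = bl)) := by
            apply Finset.ext
            intro v
            simp only [Finset.mem_filter, Finset.mem_insert, hfin']
            by_cases hvc : v = cv
            · subst hvc
              constructor
              · intro _; exact Or.inl rfl
              · intro _; exact ⟨List.mem_toFinset.mpr h1, by rw [hccv]; omega⟩
            · rw [hcother v hvc]
              simp [hvc]
          rw [hset, Finset.card_insert_of_notMem (by simp; intro _; omega)]
          push_cast
          omega
      · -- the run stays below the best
        rw [if_neg (by simpa using heq)]
        refine ⟨by simp [h1], ?_, ?_, by simp [h4], hcbv, ?_, ?_⟩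
        · intro v hv
          rcases List.mem_append.mp hv with hv | hv
          · exact h2 v hv
          · simp at hv; omega
        · omega
        · intro v hv
          by_cases hvc : v = cv
          · rw [hvc]; omega
          · rw [hcother v hvc]
            have hvp : v ∈ p := by
              rcases List.mem_append.mp hv with hv | hv
              · exact hv
              · simp at hv; exact absurd (hv ▸ hx) hvc
            exact h6 v hvp
        · have hset : ((p ++ [x]).toFinset.filter (fun v => ((p ++ [x]).count v : Int) = bl)) =
              (p.toFinset.filter (fun v => (p.count v : Int) = bl)) := by
            apply Finset.ext
            intro v
            simp only [Finset.mem_filter, hfin']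
            by_cases hvc : v = cv
            · subst hvc
              constructor
              · rintro ⟨_, hc⟩; omega
              · rintro ⟨_, hc⟩; omega
            · rw [hcother v hvc]
          rw [hset]
          exact h7
  · -- x starts a new run
    have hxnp : x ∉ p := by
      intro hxp
      exact hx (le_antisymm (h2 x hxp) (hle cv h1))
    have hfin' : x ∉ p.toFinset := fun h => hxnp (List.mem_toFinset.mp h)
    have hcx : ((p ++ [x]).count x : Int) = 1 := by
      rw [hcnt x, if_pos rfl, List.count_eq_zero_of_not_mem hxnp]
      norm_num
    have hcother : ∀ v : Int, v ≠ x → ((p ++ [x]).count v : Int) = (p.count v : Int) := by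
      intro v hv
      rw [hcnt v, if_neg (by omega)]; push_cast; omega
    have hbvx : bv ≠ x := fun h => hxnp (h ▸ h4)
    simp only [pvStep, beq_iff_eq, if_neg hx]
    rw [if_neg (by omega)]
    by_cases heq : (1 : Int) = bl
    · rw [if_pos (by simpa using heq)]
      refine ⟨by simp, ?_, hcx.symm, by simp [h4], by rw [hcother bv hbvx]; omega, ?_, ?_⟩
      · intro v hv
        rcases List.mem_append.mp hv with hv | hv
        · exact hle v hv
        · simp at hv; omega
      · intro v hv
        by_cases hvx : v = x
        · rw [hvx, hcx]; omega
        · rw [hcother v hvx]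
          have hvp : v ∈ p := by
            rcases List.mem_append.mp hv with hv | hv
            · exact hv
            · simp at hv; exact absurd hv hvx
          exact h6 v hvp
      · have hset : ((p ++ [x]).toFinset.filter (fun v => ((p ++ [x]).count v : Int) = bl)) =
            insert x (p.toFinset.filter (fun v => (p.count v : Int) = bl)) := by
          apply Finset.ext
          intro v
          simp only [Finset.mem_filter, Finset.mem_insert, hfin, Finset.mem_insert]
          by_cases hvx : v = x
          · subst hvx
            constructor
            · intro _; exact Or.inl rfl
            · intro _; exact ⟨Or.inl rfl, by rw [hcx]; omega⟩
          · rw [hcother v hvx]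
            simp [hvx]
        rw [hset, Finset.card_insert_of_notMem (by simp [hfin'])]
        push_cast
        omega
    · rw [if_neg (by simpa using heq)]
      refine ⟨by simp, ?_, hcx.symm, by simp [h4], by rw [hcother bv hbvx]; omega, ?_, ?_⟩
      · intro v hv
        rcases List.mem_append.mp hv with hv | hv
        · exact hle v hv
        · simp at hv; omega
      · intro v hv
        by_cases hvx : v = x
        · rw [hvx, hcx]; omega
        · rw [hcother v hvx]
          have hvp : v ∈ p := by
            rcases List.mem_append.mp hv with hv | hv
            · exact hv
            · simp at hv; exact absurd hv hvx
          exact h6 v hvp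
      · have hset : ((p ++ [x]).toFinset.filter (fun v => ((p ++ [x]).count v : Int) = bl)) =
            (p.toFinset.filter (fun v => (p.count v : Int) = bl)) := by
          apply Finset.ext
          intro v
          simp only [Finset.mem_filter, hfin, Finset.mem_insert]
          by_cases hvx : v = x
          · subst hvx
            rw [hcx]
            simp [hfin']
            omega
          · rw [hcother v hvx]
            simp [hvx]
        rw [hset]
        exact h7

lemma pvInv_fold (rest : List Int) : ∀ (p : List Int) (s : Int × Int × Int × Int × Int),
    pvInv p s → (∀ v ∈ p, ∀ w ∈ rest, v ≤ w) → rest.Pairwise (· ≤ ·) →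
    pvInv (p ++ rest) (rest.foldl pvStep s) := by
  induction rest with
  | nil => intro p s h _ _; simpa using h
  | cons y ys ih =>
    intro p s h hpw hp
    have hstep := pvInv_step p y s h (fun v hv => hpw v hv y (by simp))
    have := ih (p ++ [y]) (pvStep s y) hstep ?_ (List.Pairwise.sublist (List.sublist_cons_self y ys) hp)
    · simpa using this
    · intro v hv w hw
      rcases List.mem_append.mp hv with hv | hv
      · exact hpw v hv w (by simp [hw])
      · simp at hv
        subst hv
        exact (List.pairwise_cons.mp hp).1 w hw

-- the frequency loop of A builds collections.Counter(array)
lemma pvFreq_eq_counter (array : List Int) :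
    array.foldl
      (fun d num =>
        if d.contains num then d.insert num (d.getD num 0 + 1)
        else d.insert num (1 : Int))
      PySem.Dict.empty = PySem.Dict.counter array := by
  rw [← PySem.Dict.foldl_insert_getD_add_one_eq_counter]
  congr 1
  funext d num
  by_cases hc : d.contains num
  · rw [if_pos hc]
  · rw [if_neg hc]
    have hgd : d.getD num 0 = 0 := by
      simp [PySem.Dict.getD, PySem.Dict.contains_eq_isSome_get?] at *
      cases hg : d.get? num <;> simp_all
    rw [hgd]
    norm_num

-- main equivalence on nonempty input
lemma pvMain (array : List Int) (hne : array ≠ []) : solution array = solution_alt array := by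
  -- B side: run the scan invariant over the sorted list
  rcases hsr : PySem.List.sorted array (fun x => x) false with _ | ⟨a, rest⟩
  · exact absurd ((PySem.List.sorted_eq_nil_iff _ _ _).mp hsr) hne
  have hperm : (a :: rest).Perm array := hsr ▸ PySem.List.sorted_perm array (fun x => x) false
  have hpw : (a :: rest).Pairwise (· ≤ ·) := by
    have := PySem.List.sorted_pairwise array (fun x => x)
    rw [hsr] at this
    exact this
  have hinv0 : pvInv [a] (a, 1, 1, a, 1) := by
    refine ⟨by simp, by simp, by simp, by simp, by simp, by simp, ?_⟩
    have hfa : ([a].toFinset.filter (fun v => (([a].count v : Int)) = 1)) = {a} := by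
      apply Finset.ext
      intro v
      constructor
      · intro hv
        exact Finset.mem_singleton.mpr (by simpa using (Finset.mem_filter.mp hv).1)
      · intro hv
        rw [Finset.mem_singleton] at hv
        subst hv
        exact Finset.mem_filter.mpr ⟨by simp, by simp⟩
    rw [hfa]
    simp
  have hfold := pvInv_fold rest [a] (a, 1, 1, a, 1) hinv0
    (by
      intro v hv w hw
      simp at hv
      subst hv
      exact (List.pairwise_cons.mp hpw).1 w hw)
    ((List.pairwise_cons.mp hpw).2)
  rw [show ([a] ++ rest) = a :: rest from rfl] at hfold
  rcases hst : rest.foldl pvStep (a, 1, 1, a, 1) with ⟨bv, bl, t, cv, cl⟩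
  rw [hst] at hfold
  obtain ⟨c1, c2, c3, c4, c5, c6, c7⟩ := hfold
  -- transfer the invariant facts to array
  have hcount : ∀ v : Int, (a :: rest).count v = array.count v := fun v => hperm.count_eq v
  have hmem : ∀ v : Int, v ∈ (a :: rest) ↔ v ∈ array := fun v => hperm.mem_iff
  have hFin : (a :: rest).toFinset = array.toFinset := List.toFinset_eq_of_perm _ _ hperm
  -- A side: the dictionary is Counter(array)
  have hD : ∀ v : Int, v ∈ PySem.Set.ofList array ↔ v ∈ array := fun v => PySem.Set.mem_ofList _ _
  have hDnodup : (PySem.Set.ofList array).Nodup := PySem.Set.nodup_ofList array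
  have hvals : (PySem.Dict.counter array).values
      = (PySem.Set.ofList array).map (fun k => ((array.count k : Int))) := by
    show ((PySem.Dict.counter array).items.map (·.2)) = _
    rw [PySem.Dict.items_counter]
    simp
  -- max(freq.values()) is attained
  have hvne : (PySem.Dict.counter array).values ≠ [] := by
    rw [hvals]
    have ha : a ∈ array := (hmem a).mp (by simp)
    have : a ∈ PySem.Set.ofList array := (hD a).mpr ha
    intro h
    rw [List.map_eq_nil_iff] at h
    rw [h] at this
    simp at this
  rcases hmax : PySem.List.max? (PySem.Dict.values (PySem.Dict.counter array)) (fun x => x)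
      with _ | M
  · exact absurd ((PySem.List.max?_eq_none_iff _ _).mp hmax) hvne
  have hMmem : M ∈ (PySem.Dict.counter array).values := PySem.List.max?_mem hmax
  have hMub : ∀ y ∈ (PySem.Dict.counter array).values, y ≤ M := PySem.List.max?_isMax hmax
  -- bl = M
  have hblM : bl = M := by
    rw [hvals] at hMmem hMub
    obtain ⟨v0, hv0D, hv0⟩ := List.mem_map.mp hMmem
    have hv0s : v0 ∈ (a :: rest) := (hmem v0).mpr ((hD v0).mp hv0D)
    have h1 : M ≤ bl := by
      have := c6 v0 hv0s
      rw [hcount v0] at this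
      omega
    have h2 : bl ≤ M := by
      have hbva : bv ∈ array := (hmem bv).mp c4
      have : ((array.count bv : Int)) ∈ (PySem.Set.ofList array).map (fun k => ((array.count k : Int))) :=
        List.mem_map.mpr ⟨bv, (hD bv).mpr hbva, rfl⟩
      have := hMub _ this
      rw [hcount bv] at c5
      omega
    omega
  -- modes as a filter of the distinct values
  have hmodes : (((PySem.Dict.counter array).items.filter (fun p => p.2 == M)).map (fun p => p.1))
      = (PySem.Set.ofList array).filter (fun k => (array.count k : Int) == M) := by
    rw [PySem.Dict.items_counter]
    rw [List.filter_map, List.map_map]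
    simp [Function.comp_def]
  -- length of modes equals the tie count
  have hlen : ((((PySem.Set.ofList array).filter (fun k => (array.count k : Int) == M)).length : Int)) = t := by
    have hfilnd : ((PySem.Set.ofList array).filter (fun k => (array.count k : Int) == M)).Nodup :=
      hDnodup.filter _
    have hcard : ((PySem.Set.ofList array).filter (fun k => (array.count k : Int) == M)).length
        = (((PySem.Set.ofList array).filter (fun k => (array.count k : Int) == M)).toFinset).card :=
      (List.toFinset_card_of_nodup hfilnd).symm
    rw [hcard, List.toFinset_filter]
    have hDF : (PySem.Set.ofList array).toFinset = (a :: rest).toFinset := by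
      rw [hFin]
      apply Finset.ext
      intro v
      simp only [List.mem_toFinset]
      exact hD v
    have : ((PySem.Set.ofList array).toFinset.filter (fun k => ((array.count k : Int) == M) = true))
        = ((a :: rest).toFinset.filter (fun v => (((a :: rest).count v : Int)) = bl)) := by
      rw [hDF]
      apply Finset.filter_congr
      intro v _
      rw [hcount v, hblM]
      simp
    rw [this, ← c7]
  -- put everything together
  simp only [solution, solution_alt, pvFreq_eq_counter, hmax, hmodes, hsr, hst]
  by_cases ht : t = 1
  · rw [if_pos ht]
    have hlen1 : ((PySem.Set.ofList array).filter (fun k => (array.count k : Int) == M)).length = 1 := by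
      omega
    rw [if_neg (by omega)]
    obtain ⟨m, hm⟩ := List.length_eq_one_iff.mp hlen1
    rw [hm]
    have hbvmem : bv ∈ (PySem.Set.ofList array).filter (fun k => (array.count k : Int) == M) := by
      apply List.mem_filter.mpr
      refine ⟨(hD bv).mpr ((hmem bv).mp c4), ?_⟩
      rw [hcount bv] at c5
      simp [c5, hblM]
    rw [hm] at hbvmem
    simp at hbvmem
    subst hbvmem
    rfl
  · rw [if_neg ht]
    have ht1 : 1 ≤ t := by
      have hbvmem : bv ∈ (PySem.Set.ofList array).filter (fun k => (array.count k : Int) == M) := by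
        apply List.mem_filter.mpr
        refine ⟨(hD bv).mpr ((hmem bv).mp c4), ?_⟩
        rw [hcount bv] at c5
        simp [c5, hblM]
      have := List.length_pos_of_mem hbvmem
      omega
    rw [if_pos (by omega)]

-- ===== VERDICT (by name: the statement is the Claim_ definition above) =====
theorem solution_spec : Claim_equal_solution := by
  intro array _ hpre
  unfold Spec_solution
  exact pvMain array hpre
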